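-- pv_equiv track=rewrite | github.com/ada-borowa/AoC2017 | day11.py | find_max_distance
-- ===== SOURCE A (Python) =====
-- from typing import List, Tuple
--
-- class HexField(object):
--     x: int = 0
--     y: int = 0
--     z: int = 0
--
--     def __init__(self, x, y, z):
--         self.x = x
--         self.y = y
--         self.z = z
--
--     def move(self, direction: str) -> None:
--         if direction == 'n':
--             self.y += 1
--             self.z -= 1
--         elif direction == 's':
--             self.y -= 1
--             self.z += 1
--         elif direction == 'ne':
--             self.x += 1
--             self.z -= 1
--         elif direction == 'se':
--             self.x += 1
--             self.y -= 1
--         elif direction == 'nw':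
--             self.x -= 1
--             self.y +=1
--         elif direction == 'sw':
--             self.x -= 1
--             self.z += 1
--
--     def distance(self, field: 'HexField') -> int:
--         return max(abs(self.x - field.x), abs(self.y - field.y), abs(self.z - field.z))
--
--     def show(self):
--         return self.x, self.y, self.z
--
-- START = HexField(0, 0, 0)
--
-- def find_max_distance(instructions: List[str]) -> int:
--     curr_max = 0
--     child = HexField(0, 0, 0)
--     for instruction in instructions:
--         child.move(instruction)
--         curr_dist = START.distance(child)
--         if curr_dist > curr_max:
--             curr_max = curr_dist
--     return curr_max
-- ===== SOURCE B (Python) =====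
-- # B: per-axis decomposition -- three independent 1-D scans, one per cube axis,
-- # each tracking the max |prefix sum| of that axis's step deltas; the answer is
-- # the max of the three axis maxima (max-of-max commutes over positions/axes).
-- X_DELTA = {'ne': 1, 'se': 1, 'nw': -1, 'sw': -1}
-- Y_DELTA = {'n': 1, 'nw': 1, 's': -1, 'se': -1}
-- Z_DELTA = {'s': 1, 'sw': 1, 'n': -1, 'ne': -1}
--
-- def _axis_max(instructions, delta):
--     s = 0
--     best = 0
--     for d in instructions:
--         s += delta.get(d, 0)
--         if abs(s) > best:
--             best = abs(s)
--     return best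
--
-- def find_max_distance(instructions):
--     return max(_axis_max(instructions, X_DELTA),
--                _axis_max(instructions, Y_DELTA),
--                _axis_max(instructions, Z_DELTA))
-- ===== Notes on version B (the rewrite author's own statement) =====
-- stated objective: alternative
-- what changed: Replaced A's single 3-D simulation with a running max by three independent 1-D scans, one per cube axis, each tracking the max |prefix sum| of that axis's deltas; the result is the max of the three axis maxima (max over positions of max over axes = max over axes of max over positions).
import Mathlib
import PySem

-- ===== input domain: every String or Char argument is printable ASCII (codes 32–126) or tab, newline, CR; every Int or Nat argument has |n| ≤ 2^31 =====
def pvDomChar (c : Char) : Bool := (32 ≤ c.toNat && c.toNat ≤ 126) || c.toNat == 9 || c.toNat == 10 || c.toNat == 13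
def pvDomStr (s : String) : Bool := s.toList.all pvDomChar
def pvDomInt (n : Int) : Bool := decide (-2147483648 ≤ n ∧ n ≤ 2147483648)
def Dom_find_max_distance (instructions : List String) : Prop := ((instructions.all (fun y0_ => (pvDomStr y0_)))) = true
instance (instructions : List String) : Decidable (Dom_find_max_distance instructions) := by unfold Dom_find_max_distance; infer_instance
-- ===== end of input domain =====

-- B replaces A's single 3-D walk simulation with a running max by three independent
-- 1-D scans (one per cube axis), each tracking the max |prefix sum| of that axis's
-- deltas; the answer is the max of the three axis maxima (same O(n) cost).

-- ===== PORT A =====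
-- HexField.move, as an update of the (x, y, z) triple
def hexMove (p : Int × Int × Int) (d : String) : Int × Int × Int :=
  if d = "n" then (p.1, p.2.1 + 1, p.2.2 - 1)
  else if d = "s" then (p.1, p.2.1 - 1, p.2.2 + 1)
  else if d = "ne" then (p.1 + 1, p.2.1, p.2.2 - 1)
  else if d = "se" then (p.1 + 1, p.2.1 - 1, p.2.2)
  else if d = "nw" then (p.1 - 1, p.2.1 + 1, p.2.2)
  else if d = "sw" then (p.1 - 1, p.2.1, p.2.2 + 1)
  else p

-- HexField.distance
def hexDistance (a b : Int × Int × Int) : Int :=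
  max (|a.1 - b.1|) (max (|a.2.1 - b.2.1|) (|a.2.2 - b.2.2|))

def find_max_distance (instructions : List String) : Int :=
  (instructions.foldl (fun (s : Int × (Int × Int × Int)) instruction =>
      let child := hexMove s.2 instruction
      let curr_dist := hexDistance (0, 0, 0) child
      (if curr_dist > s.1 then curr_dist else s.1, child))
    (0, (0, 0, 0))).1

-- ===== PORT B =====
def X_DELTA : PySem.Dict String Int := PySem.Dict.ofList [("ne", 1), ("se", 1), ("nw", -1), ("sw", -1)]
def Y_DELTA : PySem.Dict String Int := PySem.Dict.ofList [("n", 1), ("nw", 1), ("s", -1), ("se", -1)]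
def Z_DELTA : PySem.Dict String Int := PySem.Dict.ofList [("s", 1), ("sw", 1), ("n", -1), ("ne", -1)]

def axis_max (instructions : List String) (delta : PySem.Dict String Int) : Int :=
  (instructions.foldl (fun (st : Int × Int) d =>
      let s := st.1 + PySem.Dict.getD delta d 0
      (s, if |s| > st.2 then |s| else st.2)) (0, 0)).2

def find_max_distance_alt (instructions : List String) : Int :=
  max (max (axis_max instructions X_DELTA) (axis_max instructions Y_DELTA))
      (axis_max instructions Z_DELTA)

-- ===== PRECONDITION & SPEC =====
def Spec_find_max_distance (instructions : List String) (out : Int) : Prop := out = find_max_distance_alt instructions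
instance (instructions : List String) (out : Int) : Decidable (Spec_find_max_distance instructions out) := by unfold Spec_find_max_distance; infer_instance

-- ===== CLAIM (what is proved, stated in full; the proofs are below) =====
def Claim_equal_find_max_distance : Prop := ∀ (instructions : List String), Dom_find_max_distance instructions → Spec_find_max_distance instructions (find_max_distance instructions)

-- ===== LEMMAS AND PROOFS =====

-- distance from the origin
def hexDist0 (p : Int × Int × Int) : Int := max (|p.1|) (max (|p.2.1|) (|p.2.2|))

-- the list of intermediate positions of the walk starting at p
def posFrom (p : Int × Int × Int) : List String → List (Int × Int × Int)
  | [] => []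
  | d :: t => hexMove p d :: posFrom (hexMove p d) t

-- closed forms of the three delta tables
def deltaX (d : String) : Int :=
  if d = "ne" then 1 else if d = "se" then 1 else if d = "nw" then -1 else if d = "sw" then -1 else 0
def deltaY (d : String) : Int :=
  if d = "n" then 1 else if d = "nw" then 1 else if d = "s" then -1 else if d = "se" then -1 else 0
def deltaZ (d : String) : Int :=
  if d = "s" then 1 else if d = "sw" then 1 else if d = "n" then -1 else if d = "ne" then -1 else 0

lemma getD_X (d : String) : PySem.Dict.getD X_DELTA d 0 = deltaX d := by
  have hne : ∀ (s : String) (v : Int), d ≠ s → ¬ (((s, v).1 == d) = true) := by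
    intro s v hs h; exact hs (eq_of_beq h).symm
  have hitems : X_DELTA.items = [("ne", (1 : Int)), ("se", 1), ("nw", -1), ("sw", -1)] := by decide
  unfold deltaX
  split_ifs with h1 h2 h3 h4 <;>
    first
      | (subst_vars; decide)
      | (simp only [PySem.Dict.getD, PySem.Dict.get?, hitems]
         rw [List.find?_eq_none.mpr (by
           intro x hx
           fin_cases hx
           · exact hne _ _ h1
           · exact hne _ _ h2
           · exact hne _ _ h3
           · exact hne _ _ h4)]
         simp)

lemma getD_Y (d : String) : PySem.Dict.getD Y_DELTA d 0 = deltaY d := by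
  have hne : ∀ (s : String) (v : Int), d ≠ s → ¬ (((s, v).1 == d) = true) := by
    intro s v hs h; exact hs (eq_of_beq h).symm
  have hitems : Y_DELTA.items = [("n", (1 : Int)), ("nw", 1), ("s", -1), ("se", -1)] := by decide
  unfold deltaY
  split_ifs with h1 h2 h3 h4 <;>
    first
      | (subst_vars; decide)
      | (simp only [PySem.Dict.getD, PySem.Dict.get?, hitems]
         rw [List.find?_eq_none.mpr (by
           intro x hx
           fin_cases hx
           · exact hne _ _ h1
           · exact hne _ _ h2
           · exact hne _ _ h3
           · exact hne _ _ h4)]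
         simp)

lemma getD_Z (d : String) : PySem.Dict.getD Z_DELTA d 0 = deltaZ d := by
  have hne : ∀ (s : String) (v : Int), d ≠ s → ¬ (((s, v).1 == d) = true) := by
    intro s v hs h; exact hs (eq_of_beq h).symm
  have hitems : Z_DELTA.items = [("s", (1 : Int)), ("sw", 1), ("n", -1), ("ne", -1)] := by decide
  unfold deltaZ
  split_ifs with h1 h2 h3 h4 <;>
    first
      | (subst_vars; decide)
      | (simp only [PySem.Dict.getD, PySem.Dict.get?, hitems]
         rw [List.find?_eq_none.mpr (by
           intro x hx
           fin_cases hx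
           · exact hne _ _ h1
           · exact hne _ _ h2
           · exact hne _ _ h3
           · exact hne _ _ h4)]
         simp)

lemma move_x (p : Int × Int × Int) (d : String) : (hexMove p d).1 = p.1 + deltaX d := by
  unfold hexMove deltaX; split_ifs <;> simp_all <;> omega
lemma move_y (p : Int × Int × Int) (d : String) : (hexMove p d).2.1 = p.2.1 + deltaY d := by
  unfold hexMove deltaY; split_ifs <;> simp_all <;> omega
lemma move_z (p : Int × Int × Int) (d : String) : (hexMove p d).2.2 = p.2.2 + deltaZ d := by
  unfold hexMove deltaZ; split_ifs <;> simp_all <;> omega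

lemma hexDistance_zero (p : Int × Int × Int) : hexDistance (0, 0, 0) p = hexDist0 p := by
  simp [hexDistance, hexDist0]

-- A's fold computes the running max of origin distances along the walk
lemma foldlA_eq (ins : List String) :
    ∀ (m : Int) (p : Int × Int × Int),
      (ins.foldl (fun (s : Int × (Int × Int × Int)) instruction =>
          let child := hexMove s.2 instruction
          let curr_dist := hexDistance (0, 0, 0) child
          (if curr_dist > s.1 then curr_dist else s.1, child)) (m, p)).1
        = ((posFrom p ins).map hexDist0).foldl max m := by
  induction ins with
  | nil => intro m p; simp [posFrom]
  | cons d t ih =>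
    intro m p
    rw [List.foldl_cons]
    show (t.foldl _ ((if hexDistance (0, 0, 0) (hexMove p d) > m
                      then hexDistance (0, 0, 0) (hexMove p d) else m), hexMove p d)).1 = _
    rw [ih]
    simp only [posFrom, List.map_cons, List.foldl_cons, hexDistance_zero]
    congr 1
    simp [max_def]; omega

-- B's axis fold computes the max of |π q| over the walk positions, for π the axis projection
lemma foldlB_eq (δ : String → Int) (dict : PySem.Dict String Int)
    (hdict : ∀ d, PySem.Dict.getD dict d 0 = δ d)
    (π : Int × Int × Int → Int)
    (hmove : ∀ p d, π (hexMove p d) = π p + δ d)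
    (ins : List String) :
    ∀ (p : Int × Int × Int) (b : Int),
      (ins.foldl (fun (st : Int × Int) d =>
          let s := st.1 + PySem.Dict.getD dict d 0
          (s, if |s| > st.2 then |s| else st.2)) (π p, b)).2
        = ((posFrom p ins).map (fun q => |π q|)).foldl max b := by
  induction ins with
  | nil => intro p b; simp [posFrom]
  | cons d t ih =>
    intro p b
    rw [List.foldl_cons]
    show (t.foldl _ (π p + PySem.Dict.getD dict d 0,
          if |π p + PySem.Dict.getD dict d 0| > b then |π p + PySem.Dict.getD dict d 0| else b)).2 = _
    rw [hdict, ← hmove p d, ih (hexMove p d)]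
    simp only [posFrom, List.map_cons, List.foldl_cons]
    congr 1
    simp [max_def]; omega

-- max of two folded maxes = one fold of pointwise maxes
lemma foldl_max_split {α : Type} (g h : α → Int) (L : List α) :
    ∀ (a b : Int),
      (L.map (fun p => max (g p) (h p))).foldl max (max a b)
        = max ((L.map g).foldl max a) ((L.map h).foldl max b) := by
  induction L with
  | nil => intro a b; simp
  | cons x t ih =>
    intro a b
    simp only [List.map_cons, List.foldl_cons]
    rw [← ih]
    congr 1
    rw [max_max_max_comm]

-- ===== VERDICT (by name: the statement is the Claim_ definition above) =====
theorem find_max_distance_spec : Claim_equal_find_max_distance := by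
  intro ins _
  show find_max_distance ins = find_max_distance_alt ins
  unfold find_max_distance find_max_distance_alt axis_max
  rw [foldlA_eq]
  have hx := foldlB_eq deltaX X_DELTA getD_X (fun p => p.1) move_x ins (0, 0, 0) 0
  have hy := foldlB_eq deltaY Y_DELTA getD_Y (fun p => p.2.1) move_y ins (0, 0, 0) 0
  have hz := foldlB_eq deltaZ Z_DELTA getD_Z (fun p => p.2.2) move_z ins (0, 0, 0) 0
  simp only at hx hy hz
  rw [hx, hy, hz]
  have hfun : hexDist0 = fun (q : Int × Int × Int) => max (|q.1|) (max (|q.2.1|) (|q.2.2|)) := rfl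
  have h2 := foldl_max_split (fun (q : Int × Int × Int) => |q.1|)
      (fun (q : Int × Int × Int) => max (|q.2.1|) (|q.2.2|)) (posFrom (0, 0, 0) ins) 0 (max 0 0)
  have h3 := foldl_max_split (fun (q : Int × Int × Int) => |q.2.1|)
      (fun (q : Int × Int × Int) => |q.2.2|) (posFrom (0, 0, 0) ins) 0 0
  have t0 : max (0 : Int) 0 = 0 := rfl
  have t1 : max (0 : Int) (max 0 0) = 0 := rfl
  rw [t1, t0] at h2
  rw [t0] at h3
  rw [hfun, h2, h3, ← max_assoc]
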